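-- pv_equiv track=rewrite | github.com/MIWAMIWAMIWA/Algo | src/beer_problem.py | reformat_beer
-- ===== SOURCE A (Python) =====
-- def reformat_beer(matrix_of_beer, final_beers):
--     """
--     reformat beers and users from matrix to dictionaries for a better runtime
--     and also already write beers to answer,if there users that love only one type of
--     beer, and also not add to needed_users users that love that type of beer, because we
--     will anyway add this type of beer, and we can 'forget' about them
--
--     this function returns dict where key is beer and value is set of users who love that type
--     of beer AND returns also set of users for which we need to choose beer
--     """
--     beers_affiliation = {}
--     needed_users = set()
--     for user_id in range(len(matrix_of_beer)):
--         is_needed = 1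
--         for beer_id in final_beers:
--             if matrix_of_beer[user_id][beer_id] == 1:
--                 is_needed = 0
--                 break
--         if is_needed:
--             needed_users.add(user_id)
--             for beer_id in range(len(matrix_of_beer[0])):
--                 if matrix_of_beer[user_id][beer_id]:
--                     if beer_id not in beers_affiliation:
--                         beers_affiliation[beer_id] = set()
--                     beers_affiliation[beer_id].add(user_id)
--     return beers_affiliation, needed_users
-- ===== SOURCE B (Python) =====
-- def reformat_beer(matrix_of_beer, final_beers):
--     n = len(matrix_of_beer)
--     covered = {u for u in range(n) for b in final_beers
--                if matrix_of_beer[u][b] == 1}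
--     needed_users = set(range(n)) - covered
--     width = len(matrix_of_beer[0]) if matrix_of_beer else 0
--     pairs = [(b, u) for u in range(n) if u in needed_users
--                     for b in range(width) if matrix_of_beer[u][b]]
--     beers_affiliation = {}
--     for b, u in pairs:
--         beers_affiliation.setdefault(b, set()).add(u)
--     return beers_affiliation, needed_users
-- ===== Notes on version B (the rewrite author's own statement) =====
-- stated objective: alternative
-- what changed: A's single interleaved pass that per user decides neededness with a manual break and mutates the dict and set in place is replaced by a data-flow pipeline: build the covered-user set, obtain needed_users by set difference, materialise the flat (beer, user) incidence pair list, and group that list into the dict with one setdefault fold.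
-- outside the precondition, e.g. on reformat_beer([[1]], [0, 5]): A returns ({}, set()), B raises IndexError; on reformat_beer([[2, 0], [1]], [0]): A returns ({0: {0}}, {0}), B returns ({0: {0}}, {0})
import Mathlib
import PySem

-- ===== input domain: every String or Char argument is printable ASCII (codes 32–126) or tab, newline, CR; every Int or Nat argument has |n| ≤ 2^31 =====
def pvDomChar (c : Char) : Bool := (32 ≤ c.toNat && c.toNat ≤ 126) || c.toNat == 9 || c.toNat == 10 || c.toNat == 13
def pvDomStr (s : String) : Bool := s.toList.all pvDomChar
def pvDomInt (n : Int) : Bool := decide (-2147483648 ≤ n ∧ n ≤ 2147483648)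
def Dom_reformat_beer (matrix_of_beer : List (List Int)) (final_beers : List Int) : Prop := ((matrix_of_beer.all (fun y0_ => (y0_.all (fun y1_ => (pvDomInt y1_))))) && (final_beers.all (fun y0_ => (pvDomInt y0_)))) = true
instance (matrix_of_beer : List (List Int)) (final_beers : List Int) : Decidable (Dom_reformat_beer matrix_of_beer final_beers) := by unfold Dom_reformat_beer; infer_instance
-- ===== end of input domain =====

-- B replaces A's single interleaved filter-and-mutate pass by a data-flow pipeline: a covered-users
-- set, needed = set difference, a materialised (beer, user) incidence pair list, and one group-by
-- fold over that flat list; objective: alternative (same cost, different decomposition).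

-- ===== PORT A =====
def reformat_beer (matrix_of_beer : List (List Int)) (final_beers : List Int) : (List (Int × List Int)) × List Int :=
  let st := (PySem.List.pyRange 0 (matrix_of_beer.length : Int)).foldl
    (fun (st : PySem.Dict Int (PySem.Set Int) × PySem.Set Int) user_id =>
      -- 'is_needed' loop with break  =  any(…)
      if final_beers.any (fun beer_id =>
            PySem.List.pyGetD (PySem.List.pyGetD matrix_of_beer user_id []) beer_id 0 == 1) then st
      else
        let needed_users := PySem.Set.add st.2 user_id
        let beers_affiliation :=
          (PySem.List.pyRange 0 ((PySem.List.pyGetD matrix_of_beer 0 []).length : Int)).foldl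
            (fun ba beer_id =>
              if PySem.List.pyGetD (PySem.List.pyGetD matrix_of_beer user_id []) beer_id 0 ≠ 0 then
                -- if beer_id not in ba: ba[beer_id] = set()
                let ba := if (PySem.Dict.get? ba beer_id).isNone
                          then PySem.Dict.insert ba beer_id PySem.Set.empty else ba
                -- ba[beer_id].add(user_id)
                PySem.Dict.modify ba beer_id PySem.Set.empty (fun s => PySem.Set.add s user_id)
              else ba) st.1
        (beers_affiliation, needed_users))
    (PySem.Dict.empty, PySem.Set.empty)
  (st.1.items, st.2)

-- ===== PORT B =====
def reformat_beer_alt (matrix_of_beer : List (List Int)) (final_beers : List Int) : (List (Int × List Int)) × List Int :=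
  let n := matrix_of_beer.length
  -- covered = {u for u in range(n) for b in final_beers if matrix_of_beer[u][b] == 1}
  let covered : PySem.Set Int := PySem.Set.ofList
    ((PySem.List.pyRange 0 (n : Int)).flatMap (fun u =>
      (final_beers.filter (fun b =>
        PySem.List.pyGetD (PySem.List.pyGetD matrix_of_beer u []) b 0 == 1)).map (fun _ => u)))
  -- needed_users = set(range(n)) - covered
  let needed_users := PySem.Set.diff (PySem.Set.ofList (PySem.List.pyRange 0 (n : Int))) covered
  -- width = len(matrix_of_beer[0]) if matrix_of_beer else 0
  let width : Int := if matrix_of_beer.isEmpty then 0 else ((PySem.List.pyGetD matrix_of_beer 0 []).length : Int)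
  -- pairs = [(b, u) for u in range(n) if u in needed_users for b in range(width) if matrix_of_beer[u][b]]
  let pairs := ((PySem.List.pyRange 0 (n : Int)).filter (fun u => PySem.Set.contains needed_users u)).flatMap
    (fun u => ((PySem.List.pyRange 0 width).filter
        (fun b => !(PySem.List.pyGetD (PySem.List.pyGetD matrix_of_beer u []) b 0 == 0))).map
      (fun b => (b, u)))
  -- for b, u in pairs: beers_affiliation.setdefault(b, set()).add(u)
  let beers_affiliation := pairs.foldl
    (fun ba (p : Int × Int) => PySem.Dict.modify ba p.1 PySem.Set.empty (fun s => PySem.Set.add s p.2))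
    PySem.Dict.empty
  (beers_affiliation.items, needed_users)

-- ===== PRECONDITION & SPEC =====
-- Pre_ excludes inputs where an index access raises IndexError: some final_beers index out of a
-- row's range, or a row shorter than row 0 (the inner loop reads indices up to len(matrix[0])-1).
-- A's break can short-circuit past a bad access on a few such inputs while B's comprehension reads
-- every index; those inputs are excluded along with the raising ones.
def Pre_reformat_beer (matrix_of_beer : List (List Int)) (final_beers : List Int) : Prop :=
  ∀ row ∈ matrix_of_beer,
    (matrix_of_beer.headD []).length ≤ row.length ∧
    ∀ b ∈ final_beers, -(row.length : Int) ≤ b ∧ b < (row.length : Int)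
instance (matrix_of_beer : List (List Int)) (final_beers : List Int) : Decidable (Pre_reformat_beer matrix_of_beer final_beers) := by unfold Pre_reformat_beer; infer_instance
def pvWitness_reformat_beer : List (List Int) × List Int := ([[1, 0], [0, 2]], [0])

def Spec_reformat_beer (matrix_of_beer : List (List Int)) (final_beers : List Int) (out : (List (Int × List Int)) × List Int) : Prop := out = reformat_beer_alt matrix_of_beer final_beers
instance (matrix_of_beer : List (List Int)) (final_beers : List Int) (out : (List (Int × List Int)) × List Int) : Decidable (Spec_reformat_beer matrix_of_beer final_beers out) := by unfold Spec_reformat_beer; infer_instance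

-- ===== CLAIM (what is proved, stated in full; the proofs are below) =====
def Claim_equal_reformat_beer : Prop := ∀ (matrix_of_beer : List (List Int)) (final_beers : List Int), Dom_reformat_beer matrix_of_beer final_beers → Pre_reformat_beer matrix_of_beer final_beers → Spec_reformat_beer matrix_of_beer final_beers (reformat_beer matrix_of_beer final_beers)

-- ===== LEMMAS AND PROOFS =====

-- A's "insert an empty set if absent, then mutate" equals B's single setdefault-style modify.
theorem modify_two_step {κ ν : Type} [BEq κ] [LawfulBEq κ]
    (d : PySem.Dict κ ν) (k : κ) (dflt : ν) (f : ν → ν) :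
    PySem.Dict.modify (if (PySem.Dict.get? d k).isNone
                       then PySem.Dict.insert d k dflt else d) k dflt f
      = PySem.Dict.modify d k dflt f := by
  by_cases h : PySem.Dict.get? d k = none
  · have hc : d.contains k = false := (PySem.Dict.get?_eq_none_iff_contains d k).mp h
    simp only [h, Option.isNone_none, if_true]
    unfold PySem.Dict.modify
    rw [PySem.Dict.getD_insert_self, PySem.Dict.getD_of_get?_eq_none d dflt h]
    have hmap : d.items.map (fun p => if p.1 == k then (k, f dflt) else p) = d.items := by
      conv_rhs => rw [← List.map_id d.items]
      apply List.map_congr_left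
      intro p hp
      have hk : (p.1 == k) = false := by
        simp only [PySem.Dict.contains, List.any_eq_false] at hc
        exact Bool.eq_false_iff.mpr (hc p hp)
      simp [hk]
    apply PySem.Dict.ext
    rw [PySem.Dict.items_insert_of_contains _ _ (PySem.Dict.contains_insert_self d k dflt),
        PySem.Dict.items_insert_of_not_contains d dflt hc,
        PySem.Dict.items_insert_of_not_contains d (f dflt) hc,
        List.map_append, hmap]
    simp
  · simp [h]

-- A's single interleaved conditional pass over a pair state splits into two passes over the filtered list.
theorem foldl_filter_pair {β γ : Type} (p : Int → Bool) (f : β → Int → β) (g : γ → Int → γ) :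
    ∀ (rs : List Int) (d : β) (s : γ),
      rs.foldl (fun st u => if p u then st else (f st.1 u, g st.2 u)) (d, s)
        = ((rs.filter (fun u => !p u)).foldl f d, (rs.filter (fun u => !p u)).foldl g s) := by
  intro rs
  induction rs with
  | nil => intro d s; simp
  | cons u t ih =>
    intro d s
    by_cases h : p u
    · simp [List.foldl_cons, h, ih]
    · simp [List.foldl_cons, h, ih]

-- ===== VERDICT (by name: the statement is the Claim_ definition above) =====
theorem reformat_beer_spec : Claim_equal_reformat_beer := by
  intro m fb _ _
  unfold Spec_reformat_beer reformat_beer reformat_beer_alt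
  simp only []
  set p : Int → Bool := fun u => fb.any (fun b =>
      PySem.List.pyGetD (PySem.List.pyGetD m u []) b 0 == 1) with hp
  -- the user range is duplicate-free
  have hrange_pw : (PySem.List.pyRange 0 (m.length : Int)).Pairwise (· < ·) := by
    rw [PySem.List.pyRange_zero_natCast]
    exact List.pairwise_lt_range.map _ (by intro a b h; exact_mod_cast h)
  have hrange_nodup : (PySem.List.pyRange 0 (m.length : Int)).Nodup :=
    hrange_pw.imp (fun h => ne_of_lt h)
  -- the filtered user list both sides build
  set fl := (PySem.List.pyRange 0 (m.length : Int)).filter (fun u => !p u) with hfl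
  -- B's needed_users set is exactly that filtered list
  have hneeded : PySem.Set.diff (PySem.Set.ofList (PySem.List.pyRange 0 (m.length : Int)))
      (PySem.Set.ofList
        ((PySem.List.pyRange 0 (m.length : Int)).flatMap (fun u =>
          (fb.filter (fun b =>
            PySem.List.pyGetD (PySem.List.pyGetD m u []) b 0 == 1)).map (fun _ => u)))) = fl := by
    rw [PySem.Set.ofList_eq_self_of_nodup _ hrange_nodup]
    show List.filter _ _ = fl
    rw [hfl]
    apply List.filter_congr
    intro u hu
    congr 1
    rw [Bool.eq_iff_iff]
    simp only [PySem.Set.contains, List.elem_iff, PySem.Set.mem_ofList, List.mem_flatMap,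
      List.mem_map, List.mem_filter, List.any_eq_true, hp]
    constructor
    · rintro ⟨u', _, b, hb, rfl⟩; exact ⟨b, hb.1, hb.2⟩
    · rintro ⟨b, hb, hc⟩; exact ⟨u, hu, b, ⟨hb, hc⟩, rfl⟩
  rw [hneeded]
  -- A's interleaved pass splits into the two folds over fl
  set innerA : PySem.Dict Int (PySem.Set Int) → Int → PySem.Dict Int (PySem.Set Int) :=
    fun ba u =>
      (PySem.List.pyRange 0 ((PySem.List.pyGetD m 0 []).length : Int)).foldl
        (fun ba b =>
          if PySem.List.pyGetD (PySem.List.pyGetD m u []) b 0 ≠ 0 then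
            let ba' := if (PySem.Dict.get? ba b).isNone
                      then PySem.Dict.insert ba b PySem.Set.empty else ba
            PySem.Dict.modify ba' b PySem.Set.empty (fun s => PySem.Set.add s u)
          else ba) ba with hinnerA
  have hbody : (fun (st : PySem.Dict Int (PySem.Set Int) × PySem.Set Int) u =>
      if p u then st else (innerA st.1 u, PySem.Set.add st.2 u))
      = (fun st u =>
      if fb.any (fun b => PySem.List.pyGetD (PySem.List.pyGetD m u []) b 0 == 1) then st
      else ((PySem.List.pyRange 0 ((PySem.List.pyGetD m 0 []).length : Int)).foldl
            (fun ba b =>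
              if PySem.List.pyGetD (PySem.List.pyGetD m u []) b 0 ≠ 0 then
                let ba := if (PySem.Dict.get? ba b).isNone
                          then PySem.Dict.insert ba b PySem.Set.empty else ba
                PySem.Dict.modify ba b PySem.Set.empty (fun s => PySem.Set.add s u)
              else ba) st.1, PySem.Set.add st.2 u)) := rfl
  rw [← hbody, foldl_filter_pair p innerA PySem.Set.add, ← hfl]
  -- A's needed set: folding Set.add over the duplicate-free fl is fl itself
  have hset : List.foldl PySem.Set.add PySem.Set.empty fl = fl := by
    simp only [PySem.Set.empty]
    rw [← PySem.Set.ofList_eq_foldl]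
    exact PySem.Set.ofList_eq_self_of_nodup _ (hrange_nodup.filter _)
  rw [hset]
  -- B's user filter over the needed set is fl again
  have hflt : (PySem.List.pyRange 0 (m.length : Int)).filter
      (fun u => PySem.Set.contains fl u) = fl := by
    conv_rhs => rw [hfl]
    apply List.filter_congr
    intro u hu
    rw [Bool.eq_iff_iff]
    simp only [PySem.Set.contains, List.elem_iff, hfl, List.mem_filter]
    exact ⟨fun h => h.2, fun h => ⟨hu, h⟩⟩
  rw [hflt]
  -- B's width equals A's inner bound
  have hwidth : (if m.isEmpty then (0 : Int) else ((PySem.List.pyGetD m 0 []).length : Int))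
      = ((PySem.List.pyGetD m 0 []).length : Int) := by
    cases m with
    | nil => simp [PySem.List.pyGetD, PySem.List.pyGet?]
    | cons r t => simp
  rw [hwidth]
  -- B's fold over the flat pair list is A's nested fold
  rw [List.foldl_flatMap]
  -- the per-user dict updates agree
  have hfun : innerA = (fun ba u =>
      (((PySem.List.pyRange 0 ((PySem.List.pyGetD m 0 []).length : Int)).filter
          (fun b => !(PySem.List.pyGetD (PySem.List.pyGetD m u []) b 0 == 0))).map
        (fun b => ((b, u) : Int × Int))).foldl
        (fun ba pr => PySem.Dict.modify ba pr.1 PySem.Set.empty (fun s => PySem.Set.add s pr.2)) ba) := by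
    funext ba u
    rw [hinnerA]
    simp only [List.foldl_map, List.foldl_filter]
    induction (PySem.List.pyRange 0 ((PySem.List.pyGetD m 0 []).length : Int)) generalizing ba with
    | nil => rfl
    | cons b t ih =>
      simp only [List.foldl_cons]
      by_cases hb : PySem.List.pyGetD (PySem.List.pyGetD m u []) b 0 = 0
      · simp only [hb]
        rw [if_neg (by simp), if_neg (by simp)]
        exact ih ba
      · have hb' : (!(PySem.List.pyGetD (PySem.List.pyGetD m u []) b 0 == 0)) = true := by
          simpa using hb
        rw [if_pos hb, if_pos hb',
          modify_two_step ba b PySem.Set.empty (fun s => PySem.Set.add s u)]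
        exact ih _
  rw [hfun]
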